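-- pv_equiv track=rewrite | github.com/jeonghi/2021_Algorithm_Study | section5/응급실.py | solution
-- ===== SOURCE A (Python) =====
-- def solution(m, patient_lst):
--     from collections import deque
--     dq = deque(patient_lst)
--     patient_lst.sort(reverse=False)
--     count = 0
--     while dq:
--         if dq[0] == patient_lst[-1]:
--             dq.popleft()
--             patient_lst.pop()
--             count += 1
--             if m == 0:
--                 return count
--             else:
--                 m -= 1
--         else:
--             dq.rotate(-1)
--             if m == 0:
--                 m = len(dq)-1
--             else:
--                 m -= 1
-- ===== SOURCE B (Python) =====
-- def solution(m, patient_lst):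
--     # Group patient indices by priority, then serve whole priority classes in
--     # descending order; within a class, service order is cyclic starting at the
--     # position right after the previously served patient.
--     groups = {}
--     for i, p in enumerate(patient_lst):
--         groups[p] = groups.get(p, []) + [i]
--     count = 0
--     cur = 0
--     for p in sorted(groups, reverse=True):
--         idxs = groups[p]
--         order = [j for j in idxs if j >= cur] + [j for j in idxs if j < cur]
--         for i in order:
--             count += 1
--             if i == m:
--                 return count
--         cur = order[-1] + 1
-- ===== Notes on version B (the rewrite author's own statement) =====
-- stated objective: faster
-- what changed: Replaces the step-by-step deque rotation with a sorted companion list by grouping patient indices per priority once and serving whole priority classes in descending order, tracking only a cursor after the last served index.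
-- outside the precondition, e.g. on solution(2, [1, 2]): A returns 2, B returns None
import Mathlib
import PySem

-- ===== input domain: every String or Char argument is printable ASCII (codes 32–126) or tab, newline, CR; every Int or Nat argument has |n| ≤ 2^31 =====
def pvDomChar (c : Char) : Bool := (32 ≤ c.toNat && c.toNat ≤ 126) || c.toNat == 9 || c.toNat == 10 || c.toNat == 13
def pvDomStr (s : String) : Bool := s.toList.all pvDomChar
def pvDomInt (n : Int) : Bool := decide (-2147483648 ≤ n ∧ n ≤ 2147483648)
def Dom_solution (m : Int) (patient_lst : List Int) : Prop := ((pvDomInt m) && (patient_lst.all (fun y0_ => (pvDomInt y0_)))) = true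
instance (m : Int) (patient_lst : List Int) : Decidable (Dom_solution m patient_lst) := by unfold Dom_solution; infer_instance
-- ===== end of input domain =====

-- B replaces A's one-step deque rotations (with a sorted companion list) by grouping
-- patient indices per priority and serving whole priority classes in descending order
-- (objective: faster). A mutates its list argument (sort/pop) while B does not; the
-- equivalence proved here is about the return value only.

-- ===== PORT A =====
-- the while loop of A; fuel only makes the recursion total (it is provably sufficient
-- on the admitted inputs), none = the loop ended without `return` (Python returns None)
def loopA : Nat → List Int → List Int → Int → Int → Option Int
  | 0, _, _, _, _ => none
  | fuel+1, dq, srt, count, m =>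
    match dq with
    | [] => none
    | x :: rest =>
      match PySem.List.pyGet? srt (-1) with      -- patient_lst[-1]
      | none => none                              -- IndexError (unreachable: srt ≠ [])
      | some last =>
        if x = last then
          match PySem.List.pop? srt (-1) with     -- patient_lst.pop()
          | none => none
          | some (_, srt') =>
            if m = 0 then some (count + 1)
            else loopA fuel rest srt' (count + 1) (m - 1)
        else                                      -- dq.rotate(-1)
          if m = 0 then loopA fuel (rest ++ [x]) srt count (((rest ++ [x]).length : Int) - 1)
          else loopA fuel (rest ++ [x]) srt count (m - 1)

def solution (m : Int) (patient_lst : List Int) : Int :=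
  (loopA (patient_lst.length * patient_lst.length + patient_lst.length + 1)
    patient_lst (PySem.List.sorted patient_lst (fun x => x) false) 0 m).getD 0

-- ===== PORT B =====
-- groups[p] = groups.get(p, []) + [i]  over enumerate(patient_lst)
def bGroups (patient_lst : List Int) : PySem.Dict Int (List Int) :=
  (PySem.List.enumerate patient_lst 0).foldl
    (fun d ip => d.modify ip.2 [] (fun l => l ++ [ip.1])) PySem.Dict.empty

-- the inner `for i in order` loop: (some c, _) = returned c, (none, count') = fell through
def bInner (m : Int) : List Int → Int → Option Int × Int
  | [], count => (none, count)
  | i :: order, count =>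
    if i = m then (some (count + 1), count + 1) else bInner m order (count + 1)

-- the outer `for p in sorted(groups, reverse=True)` loop
def bOuter (m : Int) (groups : PySem.Dict Int (List Int)) : List Int → Int → Int → Option Int
  | [], _, _ => none
  | p :: ks, count, cur =>
    let idxs := groups.getD p []
    let order := idxs.filter (fun j => cur ≤ j) ++ idxs.filter (fun j => j < cur)
    match bInner m order count with
    | (some c, _) => some c
    | (none, count') =>
      match PySem.List.pyGet? order (-1) with     -- order[-1]
      | none => none                              -- IndexError (unreachable: order ≠ [])
      | some t => bOuter m groups ks count' (t + 1)

def solution_alt (m : Int) (patient_lst : List Int) : Int :=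
  let groups := bGroups patient_lst
  (bOuter m groups (PySem.List.sorted groups.keys (fun x => x) true) 0 0).getD 0

-- ===== PRECONDITION & SPEC =====
-- Pre_ restricts to the natural domain where m is a valid 0-based position of the target
-- patient in the queue. Outside it Python A either falls off the loop (returns None, not
-- an int) or, for some m ≥ len(patient_lst), returns an accidental count by decrementing
-- the out-of-range offset m until it happens to hit 0 (e.g. m=2, [1,2] → 2), a phantom
-- position no patient occupies; B naturally returns None on all such inputs.
def Pre_solution (m : Int) (patient_lst : List Int) : Prop :=
  0 ≤ m ∧ m < patient_lst.length
instance (m : Int) (patient_lst : List Int) : Decidable (Pre_solution m patient_lst) := by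
  unfold Pre_solution; infer_instance

def pvWitness_solution : Int × List Int := (1, [3, 1, 2])

def Spec_solution (m : Int) (patient_lst : List Int) (out : Int) : Prop := out = solution_alt m patient_lst
instance (m : Int) (patient_lst : List Int) (out : Int) : Decidable (Spec_solution m patient_lst out) := by unfold Spec_solution; infer_instance

-- ===== CLAIM (what is proved, stated in full; the proofs are below) =====
def Claim_equal_solution : Prop := ∀ (m : Int) (patient_lst : List Int), Dom_solution m patient_lst → Pre_solution m patient_lst → Spec_solution m patient_lst (solution m patient_lst)

-- ===== LEMMAS AND PROOFS =====

-- Both ports are proved equal to a common reference `ref`: repeatedly serve the first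
-- patient (scanning from the queue front) whose priority is maximal; the queue is the
-- index-tagged remainder, rotated so that scanning starts right after the last served one.

-- split a tagged list at its first element of priority mx
def splitMax (mx : Int) : List (Int × Int) → Option (List (Int × Int) × (Int × Int) × List (Int × Int))
  | [] => none
  | x :: xs =>
    if x.2 = mx then some ([], x, xs)
    else (splitMax mx xs).map (fun r => (x :: r.1, r.2.1, r.2.2))

def ref : Nat → List (Int × Int) → Int → Int → Option Int
  | 0, _, _, _ => none
  | f+1, dq, cnt, m =>
    match (dq.map Prod.snd).max? with
    | none => none
    | some mx =>
      match splitMax mx dq with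
      | none => none
      | some (pre, x, post) =>
        if x.1 = m then some (cnt + 1)
        else ref f (post ++ pre) (cnt + 1) m

-- remaining elements (tagged with original index, index-sorted), rotated to start at cur
def rotA (rem : List (Int × Int)) (cur : Int) : List (Int × Int) :=
  rem.filter (fun e => cur ≤ e.1) ++ rem.filter (fun e => e.1 < cur)

-- the service order of priority class p, scanning cyclically from cur
def ordL (rem : List (Int × Int)) (cur p : Int) : List Int :=
  ((rotA rem cur).filter (fun e => e.2 = p)).map Prod.fst

-- number of initial non-maximal elements of the queue (0 when empty)
def preLen (tdq : List (Int × Int)) : Nat :=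
  match (tdq.map Prod.snd).max? with
  | none => 0
  | some mx =>
    match splitMax mx tdq with
    | none => tdq.length
    | some (pre, _, _) => pre.length

-- ---- splitMax facts ----
lemma splitMax_spec {mx : Int} : ∀ {l pre post : List (Int × Int)} {x : Int × Int},
    splitMax mx l = some (pre, x, post) →
    l = pre ++ x :: post ∧ x.2 = mx ∧ ∀ e ∈ pre, e.2 ≠ mx := by
  intro l
  induction l with
  | nil => intro pre post x h; simp [splitMax] at h
  | cons a t ih =>
    intro pre post x h
    by_cases ha : a.2 = mx
    · simp [splitMax, ha] at h
      obtain ⟨h1, h2, h3⟩ := h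
      subst h1; subst h2; subst h3
      exact ⟨rfl, ha, by simp⟩
    · simp only [splitMax, if_neg ha, Option.map_eq_some_iff] at h
      obtain ⟨⟨pre', x', post'⟩, hsp, h2⟩ := h
      obtain ⟨he, hx, hpre⟩ := ih hsp
      cases h2
      refine ⟨by simp [he], hx, ?_⟩
      intro e he'
      rcases List.mem_cons.mp he' with h | h
      · subst h; exact ha
      · exact hpre e h

lemma splitMax_of_decomp {mx : Int} : ∀ (pre post : List (Int × Int)) (x : Int × Int),
    x.2 = mx → (∀ e ∈ pre, e.2 ≠ mx) →
    splitMax mx (pre ++ x :: post) = some (pre, x, post) := by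
  intro pre
  induction pre with
  | nil => intro post x hx _; simp [splitMax, hx]
  | cons a t ih =>
    intro post x hx hpre
    have ha : a.2 ≠ mx := hpre a (by simp)
    simp only [List.cons_append, splitMax, if_neg ha,
      ih post x hx (fun e he => hpre e (by simp [he]))]
    rfl

lemma splitMax_isSome {mx : Int} : ∀ {l : List (Int × Int)},
    mx ∈ l.map Prod.snd → ∃ pre x post, splitMax mx l = some (pre, x, post) := by
  intro l
  induction l with
  | nil => intro h; simp at h
  | cons a t ih =>
    intro h
    by_cases ha : a.2 = mx
    · exact ⟨[], a, t, by simp [splitMax, ha]⟩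
    · have ht : mx ∈ t.map Prod.snd := by
        rcases List.mem_map.mp h with ⟨e, he, hev⟩
        rcases List.mem_cons.mp he with h' | h'
        · exact absurd (h' ▸ hev) ha
        · exact List.mem_map.mpr ⟨e, h', hev⟩
      obtain ⟨pre, x, post, hsp⟩ := ih ht
      exact ⟨a :: pre, x, post, by simp [splitMax, ha, hsp]⟩

lemma splitMax_append {mx : Int} : ∀ {l t pre post : List (Int × Int)} {x : Int × Int},
    splitMax mx l = some (pre, x, post) →
    splitMax mx (l ++ t) = some (pre, x, post ++ t) := by
  intro l
  induction l with
  | nil => intro t pre post x h; simp [splitMax] at h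
  | cons a l' ih =>
    intro t pre post x h
    by_cases ha : a.2 = mx
    · simp [splitMax, ha] at h ⊢
      obtain ⟨h1, h2, h3⟩ := h
      subst h1; subst h2; subst h3; simp
    · simp only [splitMax, if_neg ha, Option.map_eq_some_iff] at h
      obtain ⟨⟨pre', x', post'⟩, hsp, h2⟩ := h
      cases h2
      simp only [List.cons_append, splitMax, if_neg ha, ih hsp]
      rfl

lemma max?_perm {l l' : List Int} (h : l.Perm l') : l.max? = l'.max? := by
  cases hl : l.max? with
  | none =>
    rw [List.max?_eq_none_iff] at hl
    subst hl
    have : l' = [] := h.nil_eq.symm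
    simp [this]
  | some v =>
    rw [List.max?_eq_some_iff] at hl
    symm
    rw [List.max?_eq_some_iff]
    exact ⟨h.mem_iff.mp hl.1, fun b hb => hl.2 b (h.mem_iff.mpr hb)⟩

lemma preLen_le_length (tdq : List (Int × Int)) : preLen tdq ≤ tdq.length := by
  unfold preLen
  cases h : (tdq.map Prod.snd).max? with
  | none => simp
  | some mx =>
    cases hsp : splitMax mx tdq with
    | none => simp [hsp]
    | some r =>
      obtain ⟨pre, x, post⟩ := r
      have hd := (splitMax_spec hsp).1
      simp only [hsp]
      simp [hd]

-- ---- ref facts ----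
lemma ref_rotate (f : Nat) (h : Int × Int) (t : List (Int × Int)) (cnt m mx : Int)
    (hmax : ((h :: t).map Prod.snd).max? = some mx) (hne : h.2 ≠ mx) :
    ref f (h :: t) cnt m = ref f (t ++ [h]) cnt m := by
  cases f with
  | zero => rfl
  | succ f =>
    have hmem : mx ∈ (h :: t).map Prod.snd := (List.max?_eq_some_iff.mp hmax).1
    have hmt : mx ∈ t.map Prod.snd := by
      have hm2 : mx ∈ h.2 :: t.map Prod.snd := by simpa using hmem
      rcases List.mem_cons.mp hm2 with hc | hc
      · exact absurd hc.symm hne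
      · exact hc
    obtain ⟨pre, x, post, hsp⟩ := splitMax_isSome hmt
    have hperm : ((t ++ [h]).map Prod.snd).Perm ((h :: t).map Prod.snd) := by
      simp
    have hmax' : ((t ++ [h]).map Prod.snd).max? = some mx := by
      rw [max?_perm hperm]; exact hmax
    have hsp1 : splitMax mx (h :: t) = some (h :: pre, x, post) := by
      simp [splitMax, hne, hsp]
    have hsp2 : splitMax mx (t ++ [h]) = some (pre, x, post ++ [h]) := splitMax_append hsp
    simp only [ref, hmax, hmax', hsp1, hsp2]
    have : post ++ h :: pre = (post ++ [h]) ++ pre := by simp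
    rw [this]

-- ---- sorted-list facts for A ----
lemma sorted_cons_max (v : Int) (t : List Int) (hub : ∀ y ∈ t, y ≤ v) :
    PySem.List.sorted (v :: t) (fun x => x) false
      = PySem.List.sorted t (fun x => x) false ++ [v] := by
  apply PySem.List.sorted_id_eq_of_perm_of_pairwise
  · exact ((PySem.List.sorted_perm t (fun x => x) false).append_right [v]).trans
      (List.perm_append_singleton v t)
  · rw [List.pairwise_append]
    refine ⟨PySem.List.sorted_pairwise t (fun x => x), by simp, ?_⟩
    intro a ha b hb
    rcases List.mem_singleton.mp hb with rfl
    exact hub a ((PySem.List.mem_sorted t (fun x => x) false a).mp ha)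

lemma sorted_last_max (l : List Int) (v : Int) (hv : l.max? = some v) :
    PySem.List.pyGet? (PySem.List.sorted l (fun x => x) false) (-1) = some v := by
  obtain ⟨hmem, hub⟩ := List.max?_eq_some_iff.mp hv
  have hperm : l.Perm (v :: l.erase v) := List.perm_cons_erase hmem
  have h1 : PySem.List.sorted l (fun x => x) false
      = PySem.List.sorted (v :: l.erase v) (fun x => x) false :=
    PySem.List.sorted_eq_sorted_of_perm _ _ _ (fun a b h => h) hperm
  rw [h1, sorted_cons_max v (l.erase v) (fun y hy => hub y (List.mem_of_mem_erase hy)),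
    PySem.List.pyGet?_neg_one_append_singleton]

lemma preLen_rotate (x : Int × Int) (t : List (Int × Int)) (v : Int)
    (hv : ((x :: t).map Prod.snd).max? = some v) (hx : x.2 ≠ v) :
    preLen (x :: t) = preLen (t ++ [x]) + 1 := by
  have hmem : v ∈ (x :: t).map Prod.snd := (List.max?_eq_some_iff.mp hv).1
  have hmt : v ∈ t.map Prod.snd := by
    have hm2 : v ∈ x.2 :: t.map Prod.snd := by simpa using hmem
    rcases List.mem_cons.mp hm2 with hc | hc
    · exact absurd hc.symm hx
    · exact hc
  obtain ⟨pre, y, post, hsp⟩ := splitMax_isSome hmt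
  have hperm : ((t ++ [x]).map Prod.snd).Perm ((x :: t).map Prod.snd) := by simp
  have hv2 : ((t ++ [x]).map Prod.snd).max? = some v := by rw [max?_perm hperm]; exact hv
  have hsp1 : splitMax v (x :: t) = some (x :: pre, y, post) := by
    simp [splitMax, hx, hsp]
  have hsp2 : splitMax v (t ++ [x]) = some (pre, y, post ++ [x]) := splitMax_append hsp
  unfold preLen
  simp only [hv, hv2, hsp1, hsp2]
  simp

-- ---- A = ref ----
lemma loopA_eq_ref : ∀ (f : Nat) (tdq : List (Int × Int)) (cnt moff mtag : Int),
    tdq.length * tdq.length + preLen tdq + 1 ≤ f →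
    (tdq.map Prod.fst).Nodup →
    0 ≤ moff → moff < tdq.length →
    (tdq.map Prod.fst)[moff.toNat]? = some mtag →
    loopA f (tdq.map Prod.snd) (PySem.List.sorted (tdq.map Prod.snd) (fun x => x) false) cnt moff
      = ref tdq.length tdq cnt mtag := by
  intro f
  induction f with
  | zero => intro tdq cnt moff mtag hf; omega
  | succ f ih =>
    intro tdq cnt moff mtag hf hnd h0 hlt htag
    match tdq with
    | [] => simp at hlt; omega
    | x :: t =>
      cases hv : ((x :: t).map Prod.snd).max? with
      | none => rw [List.max?_eq_none_iff] at hv; simp at hv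
      | some v =>
        have hget : PySem.List.pyGet? (PySem.List.sorted ((x :: t).map Prod.snd) (fun x => x) false) (-1) = some v :=
          sorted_last_max _ v hv
        have hub : ∀ y ∈ (x :: t).map Prod.snd, y ≤ v := (List.max?_eq_some_iff.mp hv).2
        rw [List.map_cons, loopA, ← List.map_cons]
        simp only [hget]
        by_cases hx : x.2 = v
        · -- serve the front patient
          have hubt : ∀ y ∈ t.map Prod.snd, y ≤ x.2 := by
            intro y hy; rw [hx]; exact hub y (by simp [hy])
          have hdec : PySem.List.sorted ((x :: t).map Prod.snd) (fun x => x) false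
              = PySem.List.sorted (t.map Prod.snd) (fun x => x) false ++ [x.2] := by
            rw [List.map_cons]; exact sorted_cons_max x.2 (t.map Prod.snd) hubt
          have hpop : PySem.List.pop? (PySem.List.sorted ((x :: t).map Prod.snd) (fun x => x) false) (-1)
              = some (x.2, PySem.List.sorted (t.map Prod.snd) (fun x => x) false) := by
            rw [hdec]; exact PySem.List.pop?_last _ _
          have hsp1 : splitMax v (x :: t) = some ([], x, t) := by simp [splitMax, hx]
          have hlen : (x :: t).length = t.length + 1 := rfl
          rw [hlen, ref]
          simp only [hv, hsp1, if_pos hx, hpop]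
          by_cases hm0 : moff = 0
          · have hx1 : x.1 = mtag := by
              rw [hm0] at htag; simp at htag; exact htag
            simp [hm0, hx1]
          · have hx1 : x.1 ≠ mtag := by
              intro hcon
              have hk : moff.toNat = (moff - 1).toNat + 1 := by omega
              rw [List.map_cons, hk, List.getElem?_cons_succ] at htag
              have : mtag ∈ t.map Prod.fst := by
                have := List.getElem?_eq_some_iff.mp htag
                obtain ⟨hlt2, hget2⟩ := this
                exact hget2 ▸ List.getElem_mem hlt2
              rw [List.map_cons] at hnd
              exact (List.nodup_cons.mp hnd).1 (hcon ▸ this)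
            simp only [if_neg hm0, if_neg hx1, List.append_nil]
            have hk : moff.toNat = (moff - 1).toNat + 1 := by omega
            rw [List.map_cons, hk, List.getElem?_cons_succ] at htag
            apply ih
            · have hp := preLen_le_length t
              simp only [List.length_cons] at hf
              have hsq : (t.length+1)*(t.length+1) = t.length*t.length + 2*t.length + 1 := by ring
              omega
            · have hnd2 := hnd
              rw [List.map_cons] at hnd2
              exact (List.nodup_cons.mp hnd2).2
            · omega
            · simp only [List.length_cons] at hlt; omega
            · exact htag
        · -- rotate the queue
          have hrot : ref (x :: t).length (x :: t) cnt mtag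
              = ref (t ++ [x]).length (t ++ [x]) cnt mtag := by
            have : (t ++ [x]).length = (x :: t).length := by simp
            rw [this]
            exact ref_rotate _ x t cnt mtag v hv hx
          have hxne : ¬ x.2 = v := hx
          simp only [if_neg hxne]
          have hsorteq : PySem.List.sorted ((x :: t).map Prod.snd) (fun x => x) false
              = PySem.List.sorted ((t ++ [x]).map Prod.snd) (fun x => x) false := by
            apply PySem.List.sorted_eq_sorted_of_perm _ _ _ (fun a b h => h)
            simp only [List.map_cons, List.map_append, List.map_cons, List.map_nil]
            exact (List.perm_append_singleton _ _).symm
          have hfuel : (t ++ [x]).length * (t ++ [x]).length + preLen (t ++ [x]) + 1 ≤ f := by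
            have hpr := preLen_rotate x t v hv hx
            have : (t ++ [x]).length = (x :: t).length := by simp
            rw [this]
            omega
          have hnd2 : ((t ++ [x]).map Prod.fst).Nodup := by
            apply List.Perm.nodup _ hnd
            simp only [List.map_cons, List.map_append, List.map_cons, List.map_nil]
            exact (List.perm_append_singleton _ _).symm
          have hmapsnd : t.map Prod.snd ++ [x.2] = (t ++ [x]).map Prod.snd := by simp
          rw [hrot]
          by_cases hm0 : moff = 0
          · have hx1 : x.1 = mtag := by
              rw [hm0] at htag; simp at htag; exact htag
            simp only [if_pos hm0]
            rw [hmapsnd, hsorteq]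
            apply ih _ _ _ _ hfuel hnd2
            · simp only [List.length_append, List.length_map, List.length_cons]
              push_cast; omega
            · simp only [List.length_append, List.length_map, List.length_cons]
              push_cast; omega
            · have hidx : ((((t ++ [x]).map Prod.snd).length : Int) - 1).toNat
                  = (List.map Prod.fst t).length := by simp
              rw [List.map_append, hidx]
              simp [hx1]
          · simp only [if_neg hm0]
            rw [hmapsnd, hsorteq]
            have hk : moff.toNat = (moff - 1).toNat + 1 := by omega
            rw [List.map_cons, hk, List.getElem?_cons_succ] at htag
            apply ih _ _ _ _ hfuel hnd2
            · omega
            · simp only [List.length_append, List.length_cons] at hlt ⊢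
              push_cast at hlt ⊢; omega
            · rw [List.map_append]
              rw [List.getElem?_append_left]
              · exact htag
              · simp only [List.length_cons] at hlt
                simp only [List.length_map]
                omega

-- ---- filter algebra for B ----
lemma filter_split_sorted (c : Int) (q : (Int × Int) → Bool) :
    ∀ (l : List (Int × Int)), l.Pairwise (fun a b => a.1 < b.1) →
    l.filter (fun e => q e && decide (e.1 < c)) ++ l.filter (fun e => q e && decide (c ≤ e.1))
      = l.filter q := by
  intro l
  induction l with
  | nil => intro _; simp
  | cons a t ih =>
    intro hp
    obtain ⟨ha, hp⟩ := List.pairwise_cons.mp hp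
    cases hq : q a with
    | false => simp only [List.filter_cons, hq, Bool.false_and, if_neg Bool.false_ne_true]; exact ih hp
    | true =>
      by_cases hc : a.1 < c
      · simp only [List.filter_cons, hq, Bool.true_and, decide_eq_true_eq, hc, decide_true,
          if_pos trivial, if_neg (by omega : ¬ c ≤ a.1), List.cons_append]
        rw [ih hp]
      · have h1 : t.filter (fun e => q e && decide (e.1 < c)) = [] := by
          rw [List.filter_eq_nil_iff]
          intro e he
          have := ha e he
          simp only [Bool.and_eq_true, decide_eq_true_eq, not_and]
          intro _; omega
        have h2 : t.filter (fun e => q e && decide (c ≤ e.1)) = t.filter q := by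
          apply List.filter_congr
          intro e he
          have := ha e he
          have : c ≤ e.1 := by omega
          simp [this]
        simp only [List.filter_cons, hq, Bool.true_and, if_neg hc, decide_eq_true_eq,
          if_pos (by omega : c ≤ a.1), h1, h2, List.nil_append]
        simp

-- decomposition of a fst-sorted list at the first element of class p
lemma first_class_decomp (p : Int) : ∀ (l : List (Int × Int)) (x : Int × Int) (r : List (Int × Int)),
    l.Pairwise (fun a b => a.1 < b.1) →
    l.filter (fun e => e.2 = p) = x :: r →
    l = l.filter (fun e => e.1 < x.1) ++ x :: l.filter (fun e => x.1 < e.1)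
      ∧ (∀ e ∈ l.filter (fun e => e.1 < x.1), e.2 ≠ p)
      ∧ r = (l.filter (fun e => x.1 < e.1)).filter (fun e => e.2 = p) := by
  intro l
  induction l with
  | nil => intro x r _ h; simp at h
  | cons a t ih =>
    intro x r hp hf
    obtain ⟨ha, hp⟩ := List.pairwise_cons.mp hp
    by_cases hap : a.2 = p
    · rw [List.filter_cons_of_pos (by simp [hap])] at hf
      obtain ⟨hxa, hr⟩ : x = a ∧ r = t.filter (fun e => e.2 = p) := by
        constructor
        · exact (List.cons.injEq _ _ _ _ ▸ hf).1.symm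
        · exact (List.cons.injEq _ _ _ _ ▸ hf).2.symm
      subst hxa
      have hlt : t.filter (fun e => e.1 < x.1) = [] := by
        rw [List.filter_eq_nil_iff]
        intro e he
        have := ha e he
        simp; omega
      have hgt : t.filter (fun e => x.1 < e.1) = t := by
        rw [List.filter_eq_self]
        intro e he
        have := ha e he
        simp; omega
      refine ⟨?_, ?_, ?_⟩
      · rw [List.filter_cons_of_neg (by simp), List.filter_cons_of_neg (by simp), hlt, hgt]
        simp
      · rw [List.filter_cons_of_neg (by simp), hlt]; simp
      · rw [List.filter_cons_of_neg (by simp), hgt, hr]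
    · rw [List.filter_cons_of_neg (by simp [hap])] at hf
      obtain ⟨hd, hfree, hr⟩ := ih x r hp hf
      have hx_t : x ∈ t := by
        have : x ∈ t.filter (fun e => e.2 = p) := by rw [hf]; simp
        exact List.mem_of_mem_filter this
      have hax : a.1 < x.1 := ha x hx_t
      refine ⟨?_, ?_, ?_⟩
      · rw [List.filter_cons_of_pos (by simp [hax]), List.filter_cons_of_neg (by simp; omega)]
        simpa using congrArg (a :: ·) hd
      · rw [List.filter_cons_of_pos (by simp [hax])]
        intro e he
        rcases List.mem_cons.mp he with rfl | he'
        · exact hap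
        · exact hfree e he'
      · rw [List.filter_cons_of_neg (by simp; omega)]
        exact hr

lemma rotA_perm (rem : List (Int × Int)) (cur : Int) : (rotA rem cur).Perm rem := by
  unfold rotA
  have h : rem.filter (fun e => decide (e.1 < cur)) = rem.filter (fun e => !decide (cur ≤ e.1)) := by
    apply List.filter_congr
    intro e _
    by_cases h : cur ≤ e.1
    · simp [h]
    · simp [h]
      omega
  rw [h]
  exact List.filter_append_perm _ rem

lemma fst_inj_of_sorted : ∀ {rem : List (Int × Int)}, rem.Pairwise (fun a b => a.1 < b.1) →
    ∀ {e1 e2 : Int × Int}, e1 ∈ rem → e2 ∈ rem → e1.1 = e2.1 → e1 = e2 := by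
  intro rem hs
  induction rem with
  | nil => intro e1 e2 h; simp at h
  | cons a t ih =>
    obtain ⟨ha, hp⟩ := List.pairwise_cons.mp hs
    intro e1 e2 h1 h2 heq
    rcases List.mem_cons.mp h1 with rfl | h1' <;> rcases List.mem_cons.mp h2 with rfl | h2'
    · rfl
    · exact absurd heq (by have := ha e2 h2'; omega)
    · exact absurd heq (by have := ha e1 h1'; omega)
    · exact ih hp h1' h2' heq

-- one serving step of ref, seen on the index-sorted remainder
lemma ref_step (rem : List (Int × Int)) (cur p i : Int) (rest : List Int) (cnt m : Int)
    (hs : rem.Pairwise (fun a b => a.1 < b.1))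
    (hub : ∀ e ∈ rem, e.2 ≤ p)
    (hord : ordL rem cur p = i :: rest) :
    ref rem.length (rotA rem cur) cnt m
      = (if i = m then some (cnt + 1)
         else ref (rem.filter (fun e => e.1 ≠ i)).length
               (rotA (rem.filter (fun e => e.1 ≠ i)) (i + 1)) (cnt + 1) m)
    ∧ ordL (rem.filter (fun e => e.1 ≠ i)) (i + 1) p = rest
    ∧ (rem.filter (fun e => e.1 ≠ i)).length + 1 = rem.length
    ∧ (rem.filter (fun e => e.1 ≠ i)).filter (fun e => e.2 ≠ p) = rem.filter (fun e => e.2 ≠ p) := by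
  have hsAp : (rem.filter (fun e => decide (cur ≤ e.1))).Pairwise (fun a b => a.1 < b.1) :=
    hs.filter _
  have hsAm : (rem.filter (fun e => decide (e.1 < cur))).Pairwise (fun a b => a.1 < b.1) :=
    hs.filter _
  have hfil : (rotA rem cur).filter (fun e => decide (e.2 = p))
      = (rem.filter (fun e => decide (cur ≤ e.1))).filter (fun e => decide (e.2 = p))
        ++ (rem.filter (fun e => decide (e.1 < cur))).filter (fun e => decide (e.2 = p)) := by
    unfold rotA; rw [List.filter_append]
  unfold ordL at hord
  rw [hfil, List.map_append] at hord
  cases hApf : (rem.filter (fun e => decide (cur ≤ e.1))).filter (fun e => decide (e.2 = p)) with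
  | cons y ys =>
    -- the class-p element served first lies in the segment with index ≥ cur
    rw [hApf] at hord
    simp only [List.map_cons, List.cons_append] at hord
    injection hord with hi hrest
    have hyApf : y ∈ (rem.filter (fun e => decide (cur ≤ e.1))).filter (fun e => decide (e.2 = p)) := by
      rw [hApf]; exact List.mem_cons_self
    have hyAp : y ∈ rem.filter (fun e => decide (cur ≤ e.1)) := List.mem_of_mem_filter hyApf
    have hyp : y.2 = p := by simpa using List.of_mem_filter hyApf
    have hycur : cur ≤ y.1 := by simpa using List.of_mem_filter hyAp
    have hyrem : y ∈ rem := List.mem_of_mem_filter hyAp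
    obtain ⟨hdecAp, hfreeAp, hys⟩ := first_class_decomp p _ y ys hsAp hApf
    have hrota : rotA rem cur
        = (rem.filter (fun e => decide (cur ≤ e.1))).filter (fun e => decide (e.1 < y.1))
          ++ y :: ((rem.filter (fun e => decide (cur ≤ e.1))).filter (fun e => decide (y.1 < e.1))
            ++ rem.filter (fun e => decide (e.1 < cur))) := by
      unfold rotA
      conv_lhs => rw [hdecAp]
      simp [List.append_assoc]
    have hsm : splitMax p (rotA rem cur)
        = some ((rem.filter (fun e => decide (cur ≤ e.1))).filter (fun e => decide (e.1 < y.1)), y,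
            (rem.filter (fun e => decide (cur ≤ e.1))).filter (fun e => decide (y.1 < e.1))
              ++ rem.filter (fun e => decide (e.1 < cur))) := by
      rw [hrota]
      exact splitMax_of_decomp _ _ _ hyp (fun e he => hfreeAp e he)
    have hmax : ((rotA rem cur).map Prod.snd).max? = some p := by
      rw [List.max?_eq_some_iff]
      constructor
      · exact List.mem_map.mpr ⟨y, (rotA_perm rem cur).mem_iff.mpr hyrem, hyp⟩
      · intro b hb
        obtain ⟨e, he, rfl⟩ := List.mem_map.mp hb
        exact hub e ((rotA_perm rem cur).mem_iff.mp he)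
    have hlrot : (rotA rem cur).length = rem.length := (rotA_perm rem cur).length_eq
    have hpos : 0 < rem.length := List.length_pos_of_mem hyrem
    obtain ⟨n, hn⟩ : ∃ n, rem.length = n + 1 := ⟨rem.length - 1, by omega⟩
    subst hi
    -- the three filter identities
    have hP1 : (rem.filter (fun e => decide (cur ≤ e.1))).filter (fun e => decide (e.1 < y.1))
        = rem.filter (fun e => decide (e.1 < y.1) && decide (cur ≤ e.1)) := List.filter_filter
    have hP2 : (rem.filter (fun e => decide (cur ≤ e.1))).filter (fun e => decide (y.1 < e.1))
        = rem.filter (fun e => decide (y.1 < e.1) && decide (cur ≤ e.1)) := List.filter_filter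
    have hc1 : (rem.filter (fun e => e.1 ≠ y.1)).filter (fun e => decide (y.1 + 1 ≤ e.1))
        = (rem.filter (fun e => decide (cur ≤ e.1))).filter (fun e => decide (y.1 < e.1)) := by
      rw [List.filter_filter, hP2]
      apply List.filter_congr
      intro e _
      rw [Bool.eq_iff_iff]
      simp only [Bool.and_eq_true, decide_eq_true_eq]
      omega
    have hsplit := filter_split_sorted cur (fun e => decide (e.1 < y.1)) rem hs
    have hAm' : rem.filter (fun e => decide (e.1 < cur))
        = rem.filter (fun e => decide (e.1 < y.1) && decide (e.1 < cur)) := by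
      apply List.filter_congr
      intro e _
      rw [Bool.eq_iff_iff]
      simp only [Bool.and_eq_true, decide_eq_true_eq]
      omega
    have hc2 : (rem.filter (fun e => e.1 ≠ y.1)).filter (fun e => decide (e.1 < y.1 + 1))
        = rem.filter (fun e => decide (e.1 < cur))
          ++ (rem.filter (fun e => decide (cur ≤ e.1))).filter (fun e => decide (e.1 < y.1)) := by
      have hcomb : (rem.filter (fun e => e.1 ≠ y.1)).filter (fun e => decide (e.1 < y.1 + 1))
          = rem.filter (fun e => decide (e.1 < y.1)) := by
        rw [List.filter_filter]
        apply List.filter_congr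
        intro e _
        rw [Bool.eq_iff_iff]
        simp only [Bool.and_eq_true, decide_eq_true_eq]
        omega
      rw [hcomb, ← hsplit, ← hAm', hP1]
    have hrotnew : rotA (rem.filter (fun e => e.1 ≠ y.1)) (y.1 + 1)
        = (rem.filter (fun e => decide (cur ≤ e.1))).filter (fun e => decide (y.1 < e.1))
          ++ (rem.filter (fun e => decide (e.1 < cur))
            ++ (rem.filter (fun e => decide (cur ≤ e.1))).filter (fun e => decide (e.1 < y.1))) := by
      unfold rotA
      rw [hc1, hc2]
    have hlen' : (rem.filter (fun e => e.1 ≠ y.1)).length + 1 = rem.length := by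
      have h1 : (rem.filter (fun e => e.1 ≠ y.1)).length
          = (rotA (rem.filter (fun e => e.1 ≠ y.1)) (y.1 + 1)).length :=
        (rotA_perm _ _).length_eq.symm
      have h2 := congrArg List.length hrota
      rw [hlrot] at h2
      rw [h1, hrotnew]
      simp only [List.length_append, List.length_cons] at h2 ⊢
      omega
    refine ⟨?_, ?_, hlen', ?_⟩
    · -- the ref step itself
      rw [hn, ref]
      simp only [hmax, hsm]
      by_cases him : y.1 = m
      · simp [him]
      · simp only [if_neg him]
        rw [hrotnew, ← List.append_assoc]
        have : (rem.filter (fun e => e.1 ≠ y.1)).length = n := by omega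
        rw [this]
    · -- the remaining class order is the tail
      unfold ordL
      rw [hrotnew]
      simp only [List.filter_append, List.map_append]
      have hfree1 : ((rem.filter (fun e => decide (cur ≤ e.1))).filter
          (fun e => decide (e.1 < y.1))).filter (fun e => decide (e.2 = p)) = [] := by
        rw [List.filter_eq_nil_iff]
        intro e he
        have := hfreeAp e he
        simpa using this
      rw [hfree1]
      simp only [List.map_nil, List.append_nil]
      rw [← hys]
      exact hrest
    · -- only a class-p element was removed
      rw [List.filter_comm]
      apply List.filter_eq_self.mpr
      intro e he
      have hep : e.2 ≠ p := by simpa using List.of_mem_filter he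
      have herem : e ∈ rem := List.mem_of_mem_filter he
      simp only [ne_eq, decide_not, Bool.not_eq_eq_eq_not, Bool.not_true, decide_eq_false_iff_not]
      intro hcon
      exact hep (by rw [fst_inj_of_sorted hs herem hyrem hcon]; exact hyp)
  | nil =>
    -- the class-p element served first lies in the wrapped segment (index < cur)
    rw [hApf] at hord
    simp only [List.map_nil, List.nil_append] at hord
    cases hAmf : (rem.filter (fun e => decide (e.1 < cur))).filter (fun e => decide (e.2 = p)) with
    | nil => rw [hAmf] at hord; simp at hord
    | cons y ys =>
      rw [hAmf, List.map_cons] at hord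
      injection hord with hi hrest
      have hyAmf : y ∈ (rem.filter (fun e => decide (e.1 < cur))).filter (fun e => decide (e.2 = p)) := by
        rw [hAmf]; exact List.mem_cons_self
      have hyAm : y ∈ rem.filter (fun e => decide (e.1 < cur)) := List.mem_of_mem_filter hyAmf
      have hyp : y.2 = p := by simpa using List.of_mem_filter hyAmf
      have hycur : y.1 < cur := by simpa using List.of_mem_filter hyAm
      have hyrem : y ∈ rem := List.mem_of_mem_filter hyAm
      have hfreeApAll : ∀ e ∈ rem.filter (fun e => decide (cur ≤ e.1)), e.2 ≠ p := by
        intro e he hcon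
        have : e ∈ (rem.filter (fun e => decide (cur ≤ e.1))).filter (fun e => decide (e.2 = p)) :=
          List.mem_filter.mpr ⟨he, by simp [hcon]⟩
        rw [hApf] at this
        simp at this
      obtain ⟨hdecAm, hfreeAm, hys⟩ := first_class_decomp p _ y ys hsAm hAmf
      have hrota : rotA rem cur
          = (rem.filter (fun e => decide (cur ≤ e.1))
              ++ (rem.filter (fun e => decide (e.1 < cur))).filter (fun e => decide (e.1 < y.1)))
            ++ y :: (rem.filter (fun e => decide (e.1 < cur))).filter (fun e => decide (y.1 < e.1)) := by
        unfold rotA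
        conv_lhs => rw [hdecAm]
        simp [List.append_assoc]
      have hsm : splitMax p (rotA rem cur)
          = some (rem.filter (fun e => decide (cur ≤ e.1))
              ++ (rem.filter (fun e => decide (e.1 < cur))).filter (fun e => decide (e.1 < y.1)), y,
              (rem.filter (fun e => decide (e.1 < cur))).filter (fun e => decide (y.1 < e.1))) := by
        rw [hrota]
        apply splitMax_of_decomp _ _ _ hyp
        intro e he
        rcases List.mem_append.mp he with h1 | h1
        · exact hfreeApAll e h1
        · exact hfreeAm e h1
      have hmax : ((rotA rem cur).map Prod.snd).max? = some p := by
        rw [List.max?_eq_some_iff]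
        constructor
        · exact List.mem_map.mpr ⟨y, (rotA_perm rem cur).mem_iff.mpr hyrem, hyp⟩
        · intro b hb
          obtain ⟨e, he, rfl⟩ := List.mem_map.mp hb
          exact hub e ((rotA_perm rem cur).mem_iff.mp he)
      have hlrot : (rotA rem cur).length = rem.length := (rotA_perm rem cur).length_eq
      have hpos : 0 < rem.length := List.length_pos_of_mem hyrem
      obtain ⟨n, hn⟩ : ∃ n, rem.length = n + 1 := ⟨rem.length - 1, by omega⟩
      subst hi
      have hQ1 : (rem.filter (fun e => decide (e.1 < cur))).filter (fun e => decide (e.1 < y.1))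
          = rem.filter (fun e => decide (e.1 < y.1) && decide (e.1 < cur)) := List.filter_filter
      have hQ2 : (rem.filter (fun e => decide (e.1 < cur))).filter (fun e => decide (y.1 < e.1))
          = rem.filter (fun e => decide (y.1 < e.1) && decide (e.1 < cur)) := List.filter_filter
      have hsplit := filter_split_sorted cur (fun e => decide (y.1 < e.1)) rem hs
      have hAp' : rem.filter (fun e => decide (cur ≤ e.1))
          = rem.filter (fun e => decide (y.1 < e.1) && decide (cur ≤ e.1)) := by
        apply List.filter_congr
        intro e _
        rw [Bool.eq_iff_iff]
        simp only [Bool.and_eq_true, decide_eq_true_eq]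
        omega
      have hc1 : (rem.filter (fun e => e.1 ≠ y.1)).filter (fun e => decide (y.1 + 1 ≤ e.1))
          = (rem.filter (fun e => decide (e.1 < cur))).filter (fun e => decide (y.1 < e.1))
            ++ rem.filter (fun e => decide (cur ≤ e.1)) := by
        have hcomb : (rem.filter (fun e => e.1 ≠ y.1)).filter (fun e => decide (y.1 + 1 ≤ e.1))
            = rem.filter (fun e => decide (y.1 < e.1)) := by
          rw [List.filter_filter]
          apply List.filter_congr
          intro e _
          rw [Bool.eq_iff_iff]
          simp only [Bool.and_eq_true, decide_eq_true_eq]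
          omega
        rw [hcomb, ← hsplit, ← hAp', hQ2]
      have hc2 : (rem.filter (fun e => e.1 ≠ y.1)).filter (fun e => decide (e.1 < y.1 + 1))
          = (rem.filter (fun e => decide (e.1 < cur))).filter (fun e => decide (e.1 < y.1)) := by
        rw [List.filter_filter, hQ1]
        apply List.filter_congr
        intro e _
        rw [Bool.eq_iff_iff]
        simp only [Bool.and_eq_true, decide_eq_true_eq]
        omega
      have hrotnew : rotA (rem.filter (fun e => e.1 ≠ y.1)) (y.1 + 1)
          = (rem.filter (fun e => decide (e.1 < cur))).filter (fun e => decide (y.1 < e.1))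
            ++ (rem.filter (fun e => decide (cur ≤ e.1))
              ++ (rem.filter (fun e => decide (e.1 < cur))).filter (fun e => decide (e.1 < y.1))) := by
        unfold rotA
        rw [hc1, hc2, List.append_assoc]
      have hlen' : (rem.filter (fun e => e.1 ≠ y.1)).length + 1 = rem.length := by
        have h1 : (rem.filter (fun e => e.1 ≠ y.1)).length
            = (rotA (rem.filter (fun e => e.1 ≠ y.1)) (y.1 + 1)).length :=
          (rotA_perm _ _).length_eq.symm
        have h2 := congrArg List.length hrota
        rw [hlrot] at h2
        rw [h1, hrotnew]
        simp only [List.length_append, List.length_cons] at h2 ⊢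
        omega
      refine ⟨?_, ?_, hlen', ?_⟩
      · rw [hn, ref]
        simp only [hmax, hsm]
        by_cases him : y.1 = m
        · simp [him]
        · simp only [if_neg him]
          rw [hrotnew, ← List.append_assoc]
          have : (rem.filter (fun e => e.1 ≠ y.1)).length = n := by omega
          rw [this]
      · unfold ordL
        rw [hrotnew]
        simp only [List.filter_append, List.map_append]
        have hfree1 : (rem.filter (fun e => decide (cur ≤ e.1))).filter
            (fun e => decide (e.2 = p)) = [] := hApf
        have hfree2 : ((rem.filter (fun e => decide (e.1 < cur))).filter
            (fun e => decide (e.1 < y.1))).filter (fun e => decide (e.2 = p)) = [] := by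
          rw [List.filter_eq_nil_iff]
          intro e he
          have := hfreeAm e he
          simpa using this
        rw [hfree1, hfree2]
        simp only [List.map_nil, List.append_nil]
        rw [← hys]
        exact hrest
      · rw [List.filter_comm]
        apply List.filter_eq_self.mpr
        intro e he
        have hep : e.2 ≠ p := by simpa using List.of_mem_filter he
        have herem : e ∈ rem := List.mem_of_mem_filter he
        simp only [ne_eq, decide_not, Bool.not_eq_eq_eq_not, Bool.not_true, decide_eq_false_iff_not]
        intro hcon
        exact hep (by rw [fst_inj_of_sorted hs herem hyrem hcon]; exact hyp)

lemma filter_map_comm {α β : Type} (f : α → β) (p : β → Bool) :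
    ∀ (l : List α), (l.map f).filter p = (l.filter (fun a => p (f a))).map f := by
  intro l
  induction l with
  | nil => rfl
  | cons a t ih =>
    cases hp : p (f a) with
    | true => simp [hp, ih]
    | false => simp [hp, ih]

-- the order list bOuter computes is ordL
lemma ordL_eq (rem : List (Int × Int)) (cur p : Int) :
    ((rem.filter (fun e => decide (e.2 = p))).map Prod.fst).filter (fun j => decide (cur ≤ j))
      ++ ((rem.filter (fun e => decide (e.2 = p))).map Prod.fst).filter (fun j => decide (j < cur))
    = ordL rem cur p := by
  unfold ordL rotA
  rw [List.filter_append, List.map_append]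
  congr 1
  · rw [filter_map_comm, List.filter_comm]
  · rw [filter_map_comm, List.filter_comm]

-- serving one whole priority class
lemma ref_class : ∀ (ord : List Int) (rem : List (Int × Int)) (cur p cnt m : Int),
    rem.Pairwise (fun a b => a.1 < b.1) →
    (∀ e ∈ rem, e.2 ≤ p) →
    ordL rem cur p = ord →
    (∀ c, (bInner m ord cnt).1 = some c → ref rem.length (rotA rem cur) cnt m = some c)
    ∧ ((bInner m ord cnt).1 = none → ∀ t, PySem.List.pyGet? ord (-1) = some t →
        ref rem.length (rotA rem cur) cnt m
          = ref (rem.filter (fun e => e.2 ≠ p)).length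
              (rotA (rem.filter (fun e => e.2 ≠ p)) (t + 1)) ((bInner m ord cnt).2) m) := by
  intro ord
  induction ord with
  | nil =>
    intro rem cur p cnt m hs hub hord
    constructor
    · intro c hc; simp [bInner] at hc
    · intro _ t ht
      rw [PySem.List.pyGet?_neg_one] at ht
      simp at ht
  | cons i rest ih =>
    intro rem cur p cnt m hs hub hord
    obtain ⟨hstep, hordtail, hlen, hfilp⟩ := ref_step rem cur p i rest cnt m hs hub hord
    by_cases him : i = m
    · constructor
      · intro c hc
        simp only [bInner, if_pos him] at hc
        rw [hstep, if_pos him, hc]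
      · intro hnone
        simp [bInner, if_pos him] at hnone
    · have hbi : bInner m (i :: rest) cnt = bInner m rest (cnt + 1) := by
        simp [bInner, him]
      have ih2 := ih (rem.filter (fun e => e.1 ≠ i)) (i + 1) p (cnt + 1) m (hs.filter _)
        (fun e he => hub e (List.mem_of_mem_filter he)) hordtail
      constructor
      · intro c hc
        rw [hbi] at hc
        rw [hstep, if_neg him]
        exact ih2.1 c hc
      · intro hnone t ht
        rw [hbi] at hnone ⊢
        cases hrest : rest with
        | nil =>
          subst hrest
          have hti : t = i := by
            rw [PySem.List.pyGet?_neg_one] at ht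
            simp at ht
            omega
          subst hti
          rw [hstep, if_neg him]
          have hnop : ∀ e ∈ rem.filter (fun e => e.1 ≠ t), e.2 ≠ p := by
            intro e he hcon
            have hmemrot : e ∈ rotA (rem.filter (fun e => e.1 ≠ t)) (t + 1) :=
              (rotA_perm _ _).mem_iff.mpr he
            have : e.1 ∈ ordL (rem.filter (fun e => e.1 ≠ t)) (t + 1) p := by
              unfold ordL
              exact List.mem_map.mpr ⟨e, List.mem_filter.mpr ⟨hmemrot, by simp [hcon]⟩, rfl⟩
            rw [hordtail] at this
            simp at this
          have hself : (rem.filter (fun e => e.1 ≠ t)).filter (fun e => e.2 ≠ p)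
              = rem.filter (fun e => e.1 ≠ t) := by
            apply List.filter_eq_self.mpr
            intro e he
            simpa using hnop e he
          rw [← hfilp, hself]
          simp [bInner]
        | cons r rs =>
          subst hrest
          have ht2 : PySem.List.pyGet? (r :: rs) (-1) = some t := by
            rw [PySem.List.pyGet?_neg_one] at ht ⊢
            rwa [List.getLast?_cons_cons] at ht
          rw [hstep, if_neg him]
          rw [← hfilp]
          exact ih2.2 hnone t ht2

-- ---- B = ref ----
lemma bOuter_eq_ref : ∀ (ks : List Int) (rem : List (Int × Int)) (groups : PySem.Dict Int (List Int))
    (cnt cur m : Int),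
    rem.Pairwise (fun a b => a.1 < b.1) →
    ks.Pairwise (fun a b => b < a) →
    (∀ e ∈ rem, e.2 ∈ ks) →
    (∀ k ∈ ks, k ∈ rem.map Prod.snd) →
    (∀ k ∈ ks, groups.getD k [] = (rem.filter (fun e => e.2 = k)).map Prod.fst) →
    bOuter m groups ks cnt cur = ref rem.length (rotA rem cur) cnt m := by
  intro ks
  induction ks with
  | nil =>
    intro rem groups cnt cur m hs hks hmem hpres hgd
    have hrem : rem = [] := by
      cases rem with
      | nil => rfl
      | cons e t => exact absurd (hmem e List.mem_cons_self) (by simp)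
    subst hrem
    simp [bOuter, rotA, ref]
  | cons p ks ih =>
    intro rem groups cnt cur m hs hks hmem hpres hgd
    obtain ⟨hkp, hks2⟩ := List.pairwise_cons.mp hks
    have hub : ∀ e ∈ rem, e.2 ≤ p := by
      intro e he
      rcases List.mem_cons.mp (hmem e he) with hc | hc
      · exact le_of_eq hc
      · exact le_of_lt (hkp e.2 hc)
    have hidxs : groups.getD p [] = (rem.filter (fun e => decide (e.2 = p))).map Prod.fst :=
      hgd p List.mem_cons_self
    have hpne : ordL rem cur p ≠ [] := by
      obtain ⟨e, he, hev⟩ := List.mem_map.mp (hpres p List.mem_cons_self)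
      apply List.ne_nil_of_mem (a := e.1)
      unfold ordL
      exact List.mem_map.mpr ⟨e, List.mem_filter.mpr
        ⟨(rotA_perm rem cur).mem_iff.mpr he, by simp [hev]⟩, rfl⟩
    have hclass := ref_class (ordL rem cur p) rem cur p cnt m hs hub rfl
    simp only [bOuter]
    rw [hidxs, ordL_eq]
    cases hbi : bInner m (ordL rem cur p) cnt with
    | mk r1 r2 =>
      cases r1 with
      | some c =>
        rw [hclass.1 c (by rw [hbi])]
      | none =>
        obtain ⟨t, ht⟩ : ∃ t, PySem.List.pyGet? (ordL rem cur p) (-1) = some t := by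
          rw [PySem.List.pyGet?_neg_one]
          cases hgl : (ordL rem cur p).getLast? with
          | none => exact absurd (List.getLast?_eq_none_iff.mp hgl) hpne
          | some t => exact ⟨t, rfl⟩
        rw [ht]
        have h2 := hclass.2 (by rw [hbi]) t ht
        rw [hbi] at h2
        rw [h2]
        apply ih
        · exact hs.filter _
        · exact hks2
        · intro e he
          have hep : e.2 ≠ p := by simpa using List.of_mem_filter he
          rcases List.mem_cons.mp (hmem e (List.mem_of_mem_filter he)) with hc | hc
          · exact absurd hc hep
          · exact hc
        · intro k hk
          obtain ⟨e, he, hev⟩ := List.mem_map.mp (hpres k (List.mem_cons_of_mem _ hk))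
          have hkne : e.2 ≠ p := by rw [hev]; exact ne_of_lt (hkp k hk)
          exact List.mem_map.mpr ⟨e, List.mem_filter.mpr ⟨he, by simpa using hkne⟩, hev⟩
        · intro k hk
          rw [hgd k (List.mem_cons_of_mem _ hk)]
          congr 1
          rw [List.filter_comm]
          symm
          apply List.filter_eq_self.mpr
          intro e he
          have : e.2 = k := by simpa using List.of_mem_filter he
          have : e.2 ≠ p := by rw [this]; exact ne_of_lt (hkp k hk)
          simpa using this

lemma getD_bGroups (lst : List Int) (p : Int) :
    (bGroups lst).getD p []
      = ((PySem.List.enumerate lst 0).filter (fun e => e.2 = p)).map Prod.fst := by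
  unfold bGroups
  rw [show (List.foldl (fun d (ip : Int × Int) => d.modify ip.2 [] fun l => l ++ [ip.1])
      PySem.Dict.empty (PySem.List.enumerate lst 0))
    = (List.foldl (fun d (q : Int × Int) => d.modify q.1 [] fun l => l ++ [q.2])
      PySem.Dict.empty ((PySem.List.enumerate lst 0).map (fun ip => (ip.2, ip.1)))) from
    by rw [List.foldl_map]]
  rw [PySem.Dict.getD_foldl_modify_append]
  rw [filter_map_comm]
  simp only [List.map_map, Function.comp_def, PySem.Dict.getD_empty, List.nil_append]
  have hpred : (fun (a : Int × Int) => a.2 == p) = (fun (a : Int × Int) => decide (a.2 = p)) := by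
    funext a
    rw [Bool.eq_iff_iff]
    simp
  rw [hpred]

lemma keys_bGroups (lst : List Int) : (bGroups lst).keys = PySem.Set.ofList lst := by
  unfold bGroups
  rw [PySem.Dict.keys_foldl_modify_key (PySem.List.enumerate lst 0) (fun ip => ip.2) []
    (fun _ ip => (fun l => l ++ [ip.1]))]
  rw [PySem.List.map_snd_enumerate]
  rw [PySem.Set.ofList_eq_foldl]
  simp [PySem.Set.update, PySem.Dict.keys_empty]

lemma solution_alt_eq_ref (m : Int) (lst : List Int) :
    solution_alt m lst = (ref lst.length (PySem.List.enumerate lst 0) 0 m).getD 0 := by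
  unfold solution_alt
  show (bOuter m (bGroups lst) (PySem.List.sorted (bGroups lst).keys (fun x => x) true) 0 0).getD 0
    = (ref lst.length (PySem.List.enumerate lst 0) 0 m).getD 0
  have hfst : (PySem.List.enumerate lst 0).map Prod.fst
      = PySem.List.pyRange 0 (lst.length : Int) 1 := by
    rw [PySem.List.map_fst_enumerate]
    norm_num
  have hsnd : (PySem.List.enumerate lst 0).map Prod.snd = lst :=
    PySem.List.map_snd_enumerate lst 0
  have hs1 : (PySem.List.enumerate lst 0).Pairwise (fun a b => a.1 < b.1) := by
    have hpw := PySem.List.pairwise_lt_pyRange_one 0 (lst.length : Int)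
    rw [← hfst] at hpw
    exact List.pairwise_map.mp hpw
  have hnonneg : ∀ e ∈ PySem.List.enumerate lst 0, 0 ≤ e.1 := by
    intro e he
    have : e.1 ∈ (PySem.List.enumerate lst 0).map Prod.fst := List.mem_map_of_mem he
    rw [hfst] at this
    exact (PySem.List.mem_pyRange_one.mp this).1
  have hkeys := keys_bGroups lst
  have hmemlst : ∀ x, x ∈ PySem.List.sorted (bGroups lst).keys (fun x => x) true ↔ x ∈ lst := by
    intro x
    rw [PySem.List.mem_sorted, hkeys, PySem.Set.mem_ofList]
  have hrw := bOuter_eq_ref (PySem.List.sorted (bGroups lst).keys (fun x => x) true)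
    (PySem.List.enumerate lst 0) (bGroups lst) 0 0 m hs1 ?_ ?_ ?_ ?_
  · rw [hrw]
    have hrot0 : rotA (PySem.List.enumerate lst 0) 0 = PySem.List.enumerate lst 0 := by
      unfold rotA
      have h1 : (PySem.List.enumerate lst 0).filter (fun e => decide ((0:Int) ≤ e.1))
          = PySem.List.enumerate lst 0 := by
        apply List.filter_eq_self.mpr
        intro e he
        simpa using hnonneg e he
      have h2 : (PySem.List.enumerate lst 0).filter (fun e => decide (e.1 < (0:Int))) = [] := by
        rw [List.filter_eq_nil_iff]
        intro e he
        have := hnonneg e he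
        simp
        omega
      rw [h1, h2, List.append_nil]
    rw [hrot0, PySem.List.length_enumerate]
  · -- the sorted keys are strictly decreasing
    have hnd : (PySem.List.sorted (bGroups lst).keys (fun x => x) true).Nodup := by
      apply ((PySem.List.sorted_perm (bGroups lst).keys (fun x => x) true).symm).nodup
      rw [hkeys]
      exact PySem.Set.nodup_ofList lst
    have hge := PySem.List.sorted_pairwise_rev (bGroups lst).keys (fun x => x)
    exact (hge.and hnd).imp (fun h => lt_of_le_of_ne h.1 (Ne.symm h.2))
  · -- every priority of the queue is a sorted key
    intro e he
    rw [hmemlst]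
    rw [← hsnd]
    exact List.mem_map_of_mem he
  · -- every sorted key occurs among the priorities
    intro k hk
    rw [hsnd]
    exact (hmemlst k).mp hk
  · -- the groups dict holds the index lists
    intro k _
    exact getD_bGroups lst k

lemma solution_eq_ref (m : Int) (lst : List Int) (h0 : 0 ≤ m) (h1 : m < lst.length) :
    solution m lst = (ref lst.length (PySem.List.enumerate lst 0) 0 m).getD 0 := by
  unfold solution
  have hsnd : (PySem.List.enumerate lst 0).map Prod.snd = lst :=
    PySem.List.map_snd_enumerate lst 0
  have hfst : (PySem.List.enumerate lst 0).map Prod.fst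
      = PySem.List.pyRange 0 (lst.length : Int) 1 := by
    rw [PySem.List.map_fst_enumerate]
    norm_num
  have hlen : (PySem.List.enumerate lst 0).length = lst.length := PySem.List.length_enumerate lst 0
  have hmain := loopA_eq_ref (lst.length * lst.length + lst.length + 1)
    (PySem.List.enumerate lst 0) 0 m m ?_ ?_ h0 ?_ ?_
  · rw [hsnd] at hmain
    rw [hmain, hlen]
  · have := preLen_le_length (PySem.List.enumerate lst 0)
    rw [hlen] at this ⊢
    omega
  · rw [hfst]
    exact PySem.List.nodup_pyRange_one 0 (lst.length : Int)
  · rw [hlen]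
    exact h1
  · rw [hfst, PySem.List.getElem?_pyRange_one]
    rw [if_pos (by omega)]
    congr 1
    omega

-- ===== VERDICT (by name: the statement is the Claim_ definition above) =====
theorem solution_spec : Claim_equal_solution := by
  intro m lst _ hpre
  unfold Spec_solution
  rw [solution_eq_ref m lst hpre.1 hpre.2, solution_alt_eq_ref]
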